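-- pv_equiv track=rewrite | github.com/dtl915/Python | Practice/bits insert.py | insert_m_into_n
-- ===== SOURCE A (Python) =====
-- def insert_m_into_n(m, n, i, j):
--     insertlen=16-j-i
--     m=m&(2**insertlen-1)
--
--     m=m<<i
--     x=2**16-1
--     for i in range(i,j+2):
--         x-=2**i
--     n=x&n
--
--     return n|m
-- ===== SOURCE B (Python) =====
-- def insert_m_into_n(m, n, i, j):
--     m = (m & ((1 << (16 - j - i)) - 1)) << i
--     hole = (1 << (j + 2)) - (1 << i) if i < j + 2 else 0
--     return ((65535 - hole) & n) | m
-- ===== Notes on version B (the rewrite author's own statement) =====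
-- stated objective: simpler
-- what changed: The 16-iteration mask-building loop (x -= 2**k for k in range(i, j+2)) is replaced by the closed-form hole 2**(j+2) - 2**i via shifts, and the function collapses to one mask-and-or expression.
import Mathlib
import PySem

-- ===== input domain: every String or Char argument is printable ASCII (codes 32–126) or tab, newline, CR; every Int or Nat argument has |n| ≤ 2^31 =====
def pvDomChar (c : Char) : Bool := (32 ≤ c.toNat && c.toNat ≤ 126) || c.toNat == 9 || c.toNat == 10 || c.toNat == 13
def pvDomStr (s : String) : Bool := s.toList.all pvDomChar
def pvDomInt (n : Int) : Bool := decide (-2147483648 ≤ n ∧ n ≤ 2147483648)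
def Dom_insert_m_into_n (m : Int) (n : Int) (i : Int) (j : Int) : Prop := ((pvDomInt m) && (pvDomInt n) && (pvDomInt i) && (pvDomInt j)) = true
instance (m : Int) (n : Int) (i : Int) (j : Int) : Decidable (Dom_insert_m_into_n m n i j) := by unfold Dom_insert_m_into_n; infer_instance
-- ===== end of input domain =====

-- B replaces A's mask loop by the closed-form arithmetic it computes (simpler, one expression).

-- ===== PORT A =====
-- literal transliteration of A: mask m, shift, build x by the range loop, AND, OR
def insert_m_into_n (m : Int) (n : Int) (i : Int) (j : Int) : Int :=
  let insertlen : Int := 16 - j - i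
  let m1 := PySem.Int.band m (2 ^ insertlen.toNat - 1)
  let m2 := m1 <<< i.toNat
  let x : Int := 2 ^ (16 : Nat) - 1
  let x := (PySem.List.pyRange i (j + 2) 1).foldl (fun x k => x - 2 ^ k.toNat) x
  let n2 := PySem.Int.band x n
  PySem.Int.bor n2 m2

-- ===== PORT B =====
def insert_m_into_n_alt (m : Int) (n : Int) (i : Int) (j : Int) : Int :=
  let m2 := (PySem.Int.band m (((1 : Int) <<< (16 - j - i).toNat) - 1)) <<< i.toNat
  let hole : Int := if i < j + 2 then ((1 : Int) <<< (j + 2).toNat) - ((1 : Int) <<< i.toNat) else 0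
  PySem.Int.bor (PySem.Int.band (65535 - hole) n) m2

-- ===== PRECONDITION & SPEC =====
-- Pre: i ≥ 0 (else m << i raises ValueError) and i + j ≤ 16 (else 2**insertlen is a float and m & it raises TypeError)
def Pre_insert_m_into_n (m : Int) (n : Int) (i : Int) (j : Int) : Prop := 0 ≤ i ∧ i + j ≤ 16
instance (m : Int) (n : Int) (i : Int) (j : Int) : Decidable (Pre_insert_m_into_n m n i j) := by unfold Pre_insert_m_into_n; infer_instance
def pvWitness_insert_m_into_n : Int × Int × Int × Int := (21, 1024, 2, 6)

def Spec_insert_m_into_n (m : Int) (n : Int) (i : Int) (j : Int) (out : Int) : Prop := out = insert_m_into_n_alt m n i j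
instance (m : Int) (n : Int) (i : Int) (j : Int) (out : Int) : Decidable (Spec_insert_m_into_n m n i j out) := by unfold Spec_insert_m_into_n; infer_instance

-- ===== CLAIM =====
def Claim_equal_insert_m_into_n : Prop := ∀ (m : Int) (n : Int) (i : Int) (j : Int), Dom_insert_m_into_n m n i j → Pre_insert_m_into_n m n i j → Spec_insert_m_into_n m n i j (insert_m_into_n m n i j)

-- ===== LEMMAS AND PROOFS =====

-- A's loop, in closed form: subtracting 2^k for k in range(a,b) removes 2^b - 2^a when the range is nonempty
theorem foldl_sub_pow (a b x : Int) (ha : 0 ≤ a) :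
    (PySem.List.pyRange a b 1).foldl (fun x k => x - 2 ^ k.toNat) x
      = x - (if a < b then 2 ^ b.toNat - 2 ^ a.toNat else 0) := by
  by_cases hab : a < b
  · have hk : (b - a).toNat ≠ 0 := by omega
    induction hn : (b - a).toNat generalizing a x with
    | zero => omega
    | succ t ih =>
      rw [PySem.List.pyRange_one_cons hab]
      simp only [List.foldl_cons]
      by_cases h2 : a + 1 < b
      · rw [ih (a + 1) _ (by omega) h2 (by omega) (by omega)]
        have : (a + 1).toNat = a.toNat + 1 := by omega
        simp only [hab, h2, if_pos, this, pow_succ]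
        ring
      · have hb : b = a + 1 := by omega
        have : (PySem.List.pyRange (a + 1) b 1) = [] := by
          simp [hb]
        rw [this]
        have : b.toNat = a.toNat + 1 := by omega
        simp only [List.foldl_nil, hab, if_pos, this, pow_succ]
        ring
  · have : (PySem.List.pyRange a b 1) = [] := by
      simp [PySem.List.pyRange_one, show (b - a).toNat = 0 by omega]
    simp [this, hab]

theorem one_shiftLeft_int (k : Nat) : (1 : Int) <<< k = 2 ^ k := by
  rw [Int.shiftLeft_eq]; ring

-- ===== VERDICT =====
theorem insert_m_into_n_spec : Claim_equal_insert_m_into_n := by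
  intro m n i j _ hpre
  obtain ⟨hi, hij⟩ := hpre
  show _ = _
  unfold insert_m_into_n insert_m_into_n_alt
  simp only [foldl_sub_pow i (j + 2) _ hi, one_shiftLeft_int]
  norm_num
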